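-- pv_equiv track=rewrite | github.com/lamda-bbo/mcts-transfer | mcts/MCTS.py | rank_by_value
-- ===== SOURCE A (Python) =====
-- def rank_by_value(distances):
--     sorted_items = sorted(distances.items(), key=lambda item: item[1])
--     ranked_dict = {}
--     current_rank = 0
--     previous_value = None
--     for index, (key, value) in enumerate(sorted_items):
--         if value != previous_value:
--             current_rank = index
--         ranked_dict[key] = current_rank
--         previous_value = value
--     return ranked_dict
-- ===== SOURCE B (Python) =====
-- def rank_by_value(distances):
--     cnt = {}
--     for v in distances.values():
--         cnt[v] = cnt.get(v, 0) + 1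
--     rank = {}
--     acc = 0
--     for v in sorted(cnt):
--         rank[v] = acc
--         acc += cnt[v]
--     return {key: rank[value]
--             for key, value in sorted(distances.items(), key=lambda item: item[1])}
-- ===== Notes on version B (the rewrite author's own statement) =====
-- stated objective: alternative
-- what changed: B replaces A's enumerate scan with running-rank/previous-value state by a value histogram plus a prefix-sum rank table over the sorted distinct values, then maps each key through the table.
import Mathlib
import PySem

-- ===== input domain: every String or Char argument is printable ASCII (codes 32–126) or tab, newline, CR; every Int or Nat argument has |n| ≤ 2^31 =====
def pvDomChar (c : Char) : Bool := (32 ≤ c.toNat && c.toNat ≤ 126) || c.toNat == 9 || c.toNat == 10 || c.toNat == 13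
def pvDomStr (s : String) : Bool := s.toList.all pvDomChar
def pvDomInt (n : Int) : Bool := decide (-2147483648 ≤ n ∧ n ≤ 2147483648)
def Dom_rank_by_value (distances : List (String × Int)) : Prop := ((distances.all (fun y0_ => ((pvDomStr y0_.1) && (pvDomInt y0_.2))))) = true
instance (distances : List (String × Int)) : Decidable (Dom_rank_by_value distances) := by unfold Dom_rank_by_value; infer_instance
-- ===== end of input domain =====

-- B replaces A's running-rank/previous-value scan by a value histogram plus a prefix-sum
-- rank table over the sorted distinct values (alternative algorithm; same results, same
-- output order).

-- ===== PORT A =====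
def rank_by_value (distances : List (String × Int)) : List (String × Int) :=
  let sorted_items := PySem.List.sorted distances (fun item => item.2) false
  let st := (PySem.List.enumerate sorted_items 0).foldl
    (fun (st : PySem.Dict String Int × Int × Option Int) p =>
      let current_rank := if st.2.2 ≠ some p.2.2 then p.1 else st.2.1
      (st.1.insert p.2.1 current_rank, current_rank, some p.2.2))
    (PySem.Dict.empty, 0, none)
  st.1.items

-- ===== PORT B =====
-- rank[value] (Python: KeyError if absent) is ported as getD … 0: exact here because every
-- value of distances is a key of rank by construction.
def rank_by_value_alt (distances : List (String × Int)) : List (String × Int) :=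
  let cnt := (distances.map Prod.snd).foldl
    (fun (d : PySem.Dict Int Int) v => d.insert v (d.getD v 0 + 1)) PySem.Dict.empty
  let rank := ((PySem.List.sorted cnt.keys (fun v => v) false).foldl
    (fun (st : PySem.Dict Int Int × Int) v => (st.1.insert v st.2, st.2 + cnt.getD v 0))
    (PySem.Dict.empty, 0)).1
  ((PySem.List.sorted distances (fun item => item.2) false).foldl
    (fun (d : PySem.Dict String Int) kv => d.insert kv.1 (rank.getD kv.2 0))
    PySem.Dict.empty).items

-- ===== PRECONDITION & SPEC =====
-- Pre_ excludes association lists with duplicate keys: they do not correspond to any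
-- Python dict input (dict construction collapses duplicates), so the list-level reading
-- of the ports diverges from the Python functions there.
def Pre_rank_by_value (distances : List (String × Int)) : Prop :=
  (distances.map Prod.fst).Nodup
instance (distances : List (String × Int)) : Decidable (Pre_rank_by_value distances) := by
  unfold Pre_rank_by_value; infer_instance

def pvWitness_rank_by_value : (List (String × Int)) := [("a", 1), ("b", 0), ("c", 0)]

def Spec_rank_by_value (distances : List (String × Int)) (out : List (String × Int)) : Prop := out = rank_by_value_alt distances
instance (distances : List (String × Int)) (out : List (String × Int)) : Decidable (Spec_rank_by_value distances out) := by unfold Spec_rank_by_value; infer_instance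

-- ===== CLAIM (what is proved, stated in full; the proofs are below) =====
def Claim_equal_rank_by_value : Prop := ∀ (distances : List (String × Int)), Dom_rank_by_value distances → Pre_rank_by_value distances → Spec_rank_by_value distances (rank_by_value distances)

-- ===== LEMMAS AND PROOFS =====

-- in a (≤-on-snd)-sorted list, the last element's value bounds every value
theorem pv_last_max (l : List (String × Int)) (x : String × Int)
    (hp : l.Pairwise (fun a b => a.2 ≤ b.2)) (hl : l.getLast? = some x) :
    ∀ y ∈ l, y.2 ≤ x.2 := by
  induction l with
  | nil => simp at hl
  | cons a t ih =>
    rcases List.pairwise_cons.mp hp with ⟨ha, ht⟩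
    cases t with
    | nil =>
      simp at hl; subst hl; simp
    | cons b t' =>
      rw [List.getLast?_cons_cons] at hl
      intro y hy
      rcases List.mem_cons.mp hy with hy | hy
      · subst hy
        have hx : x ∈ b :: t' := List.mem_of_getLast? hl
        exact ha x hx
      · exact ih ht hl y hy

-- the main loop invariant: over any split done ++ t of the sorted list, A's stateful
-- enumerate-fold produces the same dict as the direct count-of-smaller insert fold
theorem pv_rank_loop (vlist : List Int) (done t : List (String × Int))
    (d : PySem.Dict String Int) (cr : Int) (prev : Option Int)
    (hs : (done ++ t).Pairwise (fun a b => a.2 ≤ b.2))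
    (hv : ∀ w : Int, vlist.countP (fun u => u < w)
        = ((done ++ t).map Prod.snd).countP (fun u => u < w))
    (hprev : prev = done.getLast?.map Prod.snd)
    (hcr : ∀ p, prev = some p → cr = ((vlist.countP (fun u => u < p) : Nat) : Int)) :
    ((PySem.List.enumerate t (done.length : Int)).foldl
      (fun (st : PySem.Dict String Int × Int × Option Int) p =>
        let current_rank := if st.2.2 ≠ some p.2.2 then p.1 else st.2.1
        (st.1.insert p.2.1 current_rank, current_rank, some p.2.2))
      (d, cr, prev)).1
    = t.foldl (fun d kv => d.insert kv.1 ((vlist.countP (fun u => u < kv.2) : Nat) : Int)) d := by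
  induction t generalizing done d cr prev with
  | nil => simp [PySem.List.enumerate_nil]
  | cons kv t' ih =>
    obtain ⟨k, v⟩ := kv
    rw [PySem.List.enumerate_cons, List.foldl_cons, List.foldl_cons]
    have hcount : (if prev ≠ some v then (done.length : Int) else cr)
        = ((vlist.countP (fun u => u < v) : Nat) : Int) := by
      by_cases hpv : prev = some v
      · simp [hpv, hcr v hpv]
      · simp only [if_pos hpv]
        -- prev ≠ some v : rank = index = done.length = count of smaller values
        have hsplit := List.pairwise_append.mp hs
        obtain ⟨hd, htl, hcross⟩ := hsplit
        have hrest : ∀ u ∈ ((k, v) :: t').map Prod.snd, ¬ (u < v) := by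
          intro u hu
          simp only [List.map_cons, List.mem_cons] at hu
          rcases hu with hu | hu
          · omega
          · obtain ⟨y, hy, hyu⟩ := List.mem_map.mp hu
            have := (List.pairwise_cons.mp htl).1 y hy
            omega
        have hdone : ∀ u ∈ done.map Prod.snd, u < v := by
          intro u hu
          obtain ⟨y, hy, hyu⟩ := List.mem_map.mp hu
          cases hdl : done.getLast? with
          | none => simp [List.getLast?_eq_none_iff.mp hdl] at hy
          | some x =>
            have hyx : y.2 ≤ x.2 := pv_last_max done x hd hdl y hy
            have hxv : x.2 ≤ v := by
              have hx : x ∈ done := List.mem_of_getLast? hdl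
              exact hcross x hx (k, v) (by simp)
            have hxne : x.2 ≠ v := by
              intro h
              exact hpv (by rw [hprev, hdl, Option.map_some, h])
            omega
        rw [hv v, List.map_append, List.countP_append]
        rw [List.countP_eq_length.mpr (by intro u hu; simpa using hdone u hu)]
        rw [List.countP_eq_zero.mpr (by intro u hu; simpa using hrest u hu)]
        simp
    simp only []
    rw [hcount]
    have := ih (done ++ [(k, v)])
      (d.insert k ((vlist.countP (fun u => u < v) : Nat) : Int))
      ((vlist.countP (fun u => u < v) : Nat) : Int) (some v)
      (by rw [List.append_assoc]; simpa using hs)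
      (by intro w; rw [List.append_assoc]; simpa using hv w)
      (by simp)
      (by intro p hp; simp at hp; subst hp; rfl)
    simp only [List.length_append, List.length_cons, List.length_nil] at this
    have hlen : ((done.length + (0 + 1) : Nat) : Int) = (done.length : Int) + 1 := by push_cast; ring
    rw [hlen] at this
    exact this

-- counting u ≤ v splits into u < v and u = v
theorem pv_countP_le_split (vals : List Int) (v : Int) :
    vals.countP (fun u => u ≤ v) = vals.countP (fun u => u < v) + vals.count v := by
  induction vals with
  | nil => simp
  | cons a t ih =>
    rcases lt_trichotomy a v with h | h | h
    · simp [List.count_cons, ih, h, le_of_lt h, ne_of_lt h]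
      omega
    · subst h
      simp [List.count_cons, ih]
      omega
    · simp [List.count_cons, ih, not_lt_of_gt h, not_le_of_gt h, ne_of_gt h]

-- B's prefix-sum loop over the sorted distinct values builds the table
-- rank[w] = number of values strictly below w
theorem pv_rank_table (vals : List Int) (done t : List Int)
    (d : PySem.Dict Int Int) (acc : Int)
    (hp : (done ++ t).Pairwise (fun a b => a < b))
    (hcov : ∀ x ∈ vals, x ∈ done ++ t)
    (hacc : acc = ((vals.countP (fun u => u ∈ done) : Nat) : Int)) :
    (∀ w ∈ t,
      (t.foldl (fun (st : PySem.Dict Int Int × Int) v =>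
          (st.1.insert v st.2, st.2 + ((vals.count v : Nat) : Int))) (d, acc)).1.getD w 0
        = ((vals.countP (fun u => u < w) : Nat) : Int))
    ∧ (∀ w : Int, w ∉ t →
      (t.foldl (fun (st : PySem.Dict Int Int × Int) v =>
          (st.1.insert v st.2, st.2 + ((vals.count v : Nat) : Int))) (d, acc)).1.getD w 0
        = d.getD w 0) := by
  induction t generalizing done d acc with
  | nil => exact ⟨fun w hw => absurd hw (List.not_mem_nil), fun w _ => rfl⟩
  | cons v t' ih =>
    obtain ⟨hd, ht, hcross⟩ := List.pairwise_append.mp hp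
    have hvt' : ∀ b ∈ t', v < b := (List.pairwise_cons.mp ht).1
    have hmemdone : ∀ u ∈ done, u < v := fun u hu => hcross u hu v (by simp)
    have hcd : ∀ u ∈ vals, (u ∈ done ↔ u < v) := by
      intro u hu
      constructor
      · exact hmemdone u
      · intro hlt
        rcases List.mem_append.mp (hcov u hu) with h | h
        · exact h
        · rcases List.mem_cons.mp h with h | h
          · omega
          · have := hvt' u h; omega
    have hc : vals.countP (fun u => u ∈ done) = vals.countP (fun u => u < v) :=
      List.countP_congr (by intro x hx; simpa using hcd x hx)
    have hacc2 : acc = ((vals.countP (fun u => u < v) : Nat) : Int) := by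
      rw [hacc, hc]
    have haccnext : acc + ((vals.count v : Nat) : Int)
        = ((vals.countP (fun u => u ∈ (done ++ [v])) : Nat) : Int) := by
      have hle : vals.countP (fun u => u ∈ (done ++ [v])) = vals.countP (fun u => u ≤ v) :=
        List.countP_congr (by
          intro x hx
          simp only [decide_eq_true_eq, List.mem_append, List.mem_singleton]
          constructor
          · rintro (h | h)
            · have := hmemdone x h; omega
            · omega
          · intro h
            rcases eq_or_lt_of_le h with h | h
            · right; exact h
            · left; exact (hcd x hx).mpr h)
      rw [hacc2, hle, pv_countP_le_split]
      push_cast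
      ring
    have hvnot : v ∉ t' := fun h => lt_irrefl v (hvt' v h)
    obtain ⟨ih1, ih2⟩ := ih (done ++ [v]) (d.insert v acc) (acc + ((vals.count v : Nat) : Int))
      (by rw [List.append_assoc]; simpa using hp)
      (by intro x hx; rw [List.append_assoc]; simpa using hcov x hx)
      haccnext
    constructor
    · intro w hw
      rw [List.foldl_cons]
      rcases List.mem_cons.mp hw with hw | hw
      · subst hw
        rw [ih2 w hvnot, PySem.Dict.getD_insert_self, hacc2]
      · exact ih1 w hw
    · intro w hw
      simp only [List.mem_cons, not_or] at hw
      rw [List.foldl_cons, ih2 w hw.2, PySem.Dict.getD_insert_of_ne _ _ _ hw.1]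

-- ===== VERDICT (by name: the statement is the Claim_ definition above) =====
theorem rank_by_value_spec : Claim_equal_rank_by_value := by
  intro distances _ _
  unfold Spec_rank_by_value rank_by_value rank_by_value_alt
  simp only []
  rw [PySem.Dict.foldl_insert_getD_add_one_eq_counter, PySem.Dict.keys_counter]
  congr 1
  set vals := distances.map Prod.snd with hvals
  set SI := PySem.List.sorted distances (fun item => item.2) false with hSI
  set SK := PySem.List.sorted (PySem.Set.ofList vals) (fun v => v) false with hSK
  have hperm : SI.Perm distances := PySem.List.sorted_perm distances (fun item => item.2) false
  have hv : ∀ w : Int, vals.countP (fun u => u < w)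
      = (SI.map Prod.snd).countP (fun u => u < w) := by
    intro w
    exact ((hperm.map Prod.snd).countP_eq _).symm
  -- the inner prefix-sum fold, with Counter lookups rewritten to plain counts
  have hInner :
      List.foldl (fun (st : PySem.Dict Int Int × Int) v => (st.1.insert v st.2,
          st.2 + (PySem.Dict.counter vals).getD v 0)) (PySem.Dict.empty, 0) SK
      = List.foldl (fun (st : PySem.Dict Int Int × Int) v => (st.1.insert v st.2,
          st.2 + ((vals.count v : Nat) : Int))) (PySem.Dict.empty, 0) SK :=
    PySem.List.foldl_congr_mem _ _ _ _
      (by intro acc x _; simp [PySem.Dict.getD_counter])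
  rw [hInner]
  obtain ⟨htab, -⟩ := pv_rank_table vals [] SK PySem.Dict.empty 0
    (by rw [hSK]; simpa using PySem.List.sorted_ofList_pairwise_lt vals)
    (by intro x hx
        exact (PySem.List.mem_sorted _ _ _ x).mpr ((PySem.Set.mem_ofList _ x).mpr hx))
    (by simp)
  -- B's output fold, with table lookups rewritten to counts of smaller values
  have hOuter :
      List.foldl (fun (d : PySem.Dict String Int) kv => d.insert kv.1
          ((List.foldl (fun (st : PySem.Dict Int Int × Int) v => (st.1.insert v st.2,
              st.2 + ((vals.count v : Nat) : Int))) (PySem.Dict.empty, 0) SK).1.getD kv.2 0))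
        PySem.Dict.empty SI
      = List.foldl (fun (d : PySem.Dict String Int) kv => d.insert kv.1
          ((vals.countP (fun u => u < kv.2) : Nat) : Int)) PySem.Dict.empty SI :=
    PySem.List.foldl_congr_mem _ _ _ _
      (by intro acc kv hkv
          have h2 : kv.2 ∈ vals := List.mem_map_of_mem (hperm.mem_iff.mp hkv)
          have h3 : kv.2 ∈ SK :=
            (PySem.List.mem_sorted _ _ _ _).mpr ((PySem.Set.mem_ofList _ _).mpr h2)
          simp only [htab kv.2 h3])
  rw [hOuter]
  have := pv_rank_loop vals [] SI PySem.Dict.empty 0 none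
    (by rw [hSI]; simpa using PySem.List.sorted_pairwise distances (fun item => item.2))
    (by simpa using hv)
    (by simp)
    (by intro p hp; cases hp)
  simpa using this
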